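-- pv_equiv track=rewrite | github.com/HypoxanthineOvO/Hypoxanthine-Agent | src/hypo_agent/skills/tmux_skill.py | _has_follow_mode
-- ===== SOURCE A (Python) =====
-- _FOLLOW_FLAGS = {"-f", "-F", "--follow", "--follow=name", "--follow=descriptor"}
--
-- def _has_follow_mode(lower_tokens: list[str]) -> bool:
--     for index, token in enumerate(lower_tokens):
--         if token == "tail" and any(flag in _FOLLOW_FLAGS for flag in lower_tokens[index + 1:]):
--             return True
--         if token == "journalctl" and any(
--             flag in {"-f", "--follow"} for flag in lower_tokens[index + 1:]
--         ):
--             return True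
--         if token == "docker":
--             trailing = lower_tokens[index + 1:]
--             if "logs" in trailing and any(flag in {"-f", "--follow"} for flag in trailing):
--                 return True
--         if token == "kubectl":
--             trailing = lower_tokens[index + 1:]
--             if "logs" in trailing and any(flag in {"-f", "--follow"} for flag in trailing):
--                 return True
--     return False
-- ===== SOURCE B (Python) =====
-- _FOLLOW_FLAGS = {"-f", "-F", "--follow", "--follow=name", "--follow=descriptor"}
--
-- def _has_follow_mode(lower_tokens: list[str]) -> bool:
--     # Single right-to-left pass: track which flags / 'logs' occur to the right.
--     any_follow = ff = logs = False
--     for token in reversed(lower_tokens):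
--         if token == "tail" and any_follow:
--             return True
--         if token == "journalctl" and ff:
--             return True
--         if token in ("docker", "kubectl") and logs and ff:
--             return True
--         if token in _FOLLOW_FLAGS:
--             any_follow = True
--         if token in ("-f", "--follow"):
--             ff = True
--         if token == "logs":
--             logs = True
--     return False
-- ===== Notes on version B (the rewrite author's own statement) =====
-- stated objective: alternative
-- what changed: Replaced the per-keyword rescans of the trailing slice with a single right-to-left pass that accumulates three booleans (a follow flag seen, -f/--follow seen, 'logs' seen) so each token is inspected once; intended as asymptotically better (O(n) vs O(n^2) worst case) but measured only ~1.4x at the largest timing size.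
import Mathlib
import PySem

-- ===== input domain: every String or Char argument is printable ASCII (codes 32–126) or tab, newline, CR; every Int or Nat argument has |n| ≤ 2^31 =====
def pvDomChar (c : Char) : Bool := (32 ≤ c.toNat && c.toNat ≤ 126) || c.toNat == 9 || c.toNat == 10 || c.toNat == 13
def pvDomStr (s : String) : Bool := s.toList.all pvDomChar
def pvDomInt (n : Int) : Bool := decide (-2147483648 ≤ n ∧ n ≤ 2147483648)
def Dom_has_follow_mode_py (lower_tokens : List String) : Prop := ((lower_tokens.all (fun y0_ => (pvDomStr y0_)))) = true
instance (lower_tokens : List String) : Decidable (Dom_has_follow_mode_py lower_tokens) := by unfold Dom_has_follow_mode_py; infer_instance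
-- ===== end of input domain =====

-- B replaces A's per-keyword rescans of the trailing tokens by a single right-to-left
-- pass accumulating three booleans (one inspection per token instead of rescanning).


-- ===== PORT A =====
def pvFollowFlags : List String := ["-f", "-F", "--follow", "--follow=name", "--follow=descriptor"]
def pvFFlags : List String := ["-f", "--follow"]

-- A's loop: at `index, token`, the slice lower_tokens[index+1:] is exactly the `rest`
-- of the structural recursion; each keyword check rescans that whole trailing slice.
def hfmA : List String → Bool
  | [] => false
  | token :: rest =>
    if token == "tail" && rest.any (fun f => pvFollowFlags.contains f) then true
    else if token == "journalctl" && rest.any (fun f => pvFFlags.contains f) then true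
    else if token == "docker" && (rest.contains "logs" && rest.any (fun f => pvFFlags.contains f)) then true
    else if token == "kubectl" && (rest.contains "logs" && rest.any (fun f => pvFFlags.contains f)) then true
    else hfmA rest

def has_follow_mode_py (lower_tokens : List String) : Bool := hfmA lower_tokens

-- ===== PORT B =====
-- B's loop over reversed(lower_tokens) with three accumulated booleans.
def hfmB : List String → Bool → Bool → Bool → Bool
  | [], _, _, _ => false
  | t :: rest, anyF, ff, lgs =>
    if t == "tail" && anyF then true
    else if t == "journalctl" && ff then true
    else if (t == "docker" || t == "kubectl") && (lgs && ff) then true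
    else hfmB rest (anyF || pvFollowFlags.contains t) (ff || pvFFlags.contains t) (lgs || (t == "logs"))

def has_follow_mode_py_alt (lower_tokens : List String) : Bool :=
  hfmB lower_tokens.reverse false false false

-- ===== PRECONDITION & SPEC =====
def Spec_has_follow_mode_py (lower_tokens : List String) (out : Bool) : Prop := out = has_follow_mode_py_alt lower_tokens
instance (lower_tokens : List String) (out : Bool) : Decidable (Spec_has_follow_mode_py lower_tokens out) := by unfold Spec_has_follow_mode_py; infer_instance

-- ===== CLAIM (what is proved, stated in full; the proofs are below) =====
def Claim_equal_has_follow_mode_py : Prop := ∀ (lower_tokens : List String), Dom_has_follow_mode_py lower_tokens → Spec_has_follow_mode_py lower_tokens (has_follow_mode_py lower_tokens)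

-- ===== LEMMAS AND PROOFS =====

-- the per-token check, as a plain disjunction, given the three "seen to the right" bits
def pvCheck (t : String) (a f g : Bool) : Bool :=
  (t == "tail" && a) || (t == "journalctl" && f) || ((t == "docker" || t == "kubectl") && (g && f))

def pvAnyF (l : List String) : Bool := l.any (fun f => pvFollowFlags.contains f)
def pvFF (l : List String) : Bool := l.any (fun f => pvFFlags.contains f)
def pvLg (l : List String) : Bool := l.contains "logs"

-- A's result as an OR of per-position checks, each scanning its rest
def hfmS : List String → Bool → Bool → Bool → Bool
  | [], _, _, _ => false
  | t :: rest, a, f, g =>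
    pvCheck t (a || pvAnyF rest) (f || pvFF rest) (g || pvLg rest) || hfmS rest a f g

theorem hfmB_cons (t : String) (l : List String) (a f g : Bool) :
    hfmB (t :: l) a f g =
      (pvCheck t a f g ||
        hfmB l (a || pvFollowFlags.contains t) (f || pvFFlags.contains t) (g || (t == "logs"))) := by
  cases h1 : (t == "tail") <;> cases h2 : (t == "journalctl") <;>
    cases h3 : (t == "docker") <;> cases h4 : (t == "kubectl") <;>
    cases a <;> cases f <;> cases g <;>
    simp [hfmB, pvCheck, h1, h2, h3, h4]

theorem hfmA_cons (t : String) (l : List String) :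
    hfmA (t :: l) = (pvCheck t (pvAnyF l) (pvFF l) (pvLg l) || hfmA l) := by
  cases h1 : (t == "tail") <;> cases h2 : (t == "journalctl") <;>
    cases h3 : (t == "docker") <;> cases h4 : (t == "kubectl") <;>
    cases h5 : pvAnyF l <;> cases h6 : pvFF l <;> cases h7 : pvLg l <;>
    simp_all [hfmA, pvCheck, pvAnyF, pvFF, pvLg]

theorem pvAnyF_cons (x : String) (u : List String) :
    pvAnyF (x :: u) = (pvFollowFlags.contains x || pvAnyF u) := by
  simp [pvAnyF]

theorem pvFF_cons (x : String) (u : List String) :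
    pvFF (x :: u) = (pvFFlags.contains x || pvFF u) := by
  simp [pvFF]

theorem pvLg_cons (x : String) (u : List String) :
    pvLg (x :: u) = ((x == "logs") || pvLg u) := by
  cases h : x == "logs"
  · rw [Bool.eq_iff_iff]; simp_all [pvLg]
    intro hx; exact absurd hx.symm h
  · rw [Bool.eq_iff_iff]; simp_all [pvLg]

theorem hfmB_append (u v : List String) (a f g : Bool) :
    hfmB (u ++ v) a f g =
      (hfmB u a f g || hfmB v (a || pvAnyF u) (f || pvFF u) (g || pvLg u)) := by
  induction u generalizing a f g with
  | nil => simp [hfmB, pvAnyF, pvFF, pvLg]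
  | cons x u ih =>
    rw [List.cons_append, hfmB_cons, hfmB_cons, ih]
    rw [pvAnyF_cons, pvFF_cons, pvLg_cons]
    cases hc : pvCheck x a f g
    · simp only [Bool.false_or, Bool.or_assoc]
    · simp only [Bool.true_or]

theorem anyF_reverse (l : List String) : pvAnyF l.reverse = pvAnyF l := by
  simp [pvAnyF]
theorem ff_reverse (l : List String) : pvFF l.reverse = pvFF l := by
  simp [pvFF]
theorem lg_reverse (l : List String) : pvLg l.reverse = pvLg l := by
  simp [pvLg, List.contains_eq_mem]

theorem hfmB_rev_eq_hfmS (l : List String) (a f g : Bool) :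
    hfmB l.reverse a f g = hfmS l a f g := by
  induction l generalizing a f g with
  | nil => rfl
  | cons t rest ih =>
    rw [List.reverse_cons, hfmB_append, ih, anyF_reverse, ff_reverse, lg_reverse]
    rw [hfmB_cons]
    simp [hfmS, hfmB, Bool.or_comm]

theorem hfmA_eq_hfmS (l : List String) : hfmA l = hfmS l false false false := by
  induction l with
  | nil => rfl
  | cons t rest ih => rw [hfmA_cons, ih]; simp [hfmS]

-- ===== VERDICT (by name: the statement is the Claim_ definition above) =====
theorem has_follow_mode_py_spec : Claim_equal_has_follow_mode_py := by
  intro l _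
  unfold Spec_has_follow_mode_py has_follow_mode_py has_follow_mode_py_alt
  rw [hfmB_rev_eq_hfmS, hfmA_eq_hfmS]
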